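-- pv_equiv track=rewrite | github.com/vastus67/habitz | backend/server.py | primary_goal
-- ===== SOURCE A (Python) =====
-- def primary_goal(goals: list[str]) -> str | None:
--     priority = ["lose_fat", "build_muscle", "improve_health", "increase_energy"]
--     mapping = {
--         "lose_fat": "fatloss",
--         "build_muscle": "strength",
--         "improve_health": "mobility",
--         "increase_energy": "mobility",
--     }
--     for item in priority:
--         if item in goals:
--             return mapping[item]
--     return None
-- ===== SOURCE B (Python) =====
-- def primary_goal(goals: list[str]) -> str | None:
--     rank = {
--         "lose_fat": (0, "fatloss"),
--         "build_muscle": (1, "strength"),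
--         "improve_health": (2, "mobility"),
--         "increase_energy": (3, "mobility"),
--     }
--     best = None
--     for g in goals:
--         r = rank.get(g)
--         if r is not None and (best is None or r[0] < best[0]):
--             best = r
--     return best[1] if best is not None else None
-- ===== Notes on version B (the rewrite author's own statement) =====
-- stated objective: alternative
-- what changed: B scans the input goals once keeping the minimum-rank recognised goal, instead of A's scan over the fixed priority list with an inner membership test for each priority.
import Mathlib
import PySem

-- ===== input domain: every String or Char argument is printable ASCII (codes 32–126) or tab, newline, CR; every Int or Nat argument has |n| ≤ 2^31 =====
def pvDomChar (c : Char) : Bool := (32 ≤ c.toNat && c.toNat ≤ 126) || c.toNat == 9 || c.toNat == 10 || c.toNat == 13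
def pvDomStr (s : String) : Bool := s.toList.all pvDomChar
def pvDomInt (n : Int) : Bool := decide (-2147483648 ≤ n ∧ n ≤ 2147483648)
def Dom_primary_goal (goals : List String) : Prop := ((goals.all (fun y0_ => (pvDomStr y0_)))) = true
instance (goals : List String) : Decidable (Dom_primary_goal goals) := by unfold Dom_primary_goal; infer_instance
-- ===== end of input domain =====

-- B replaces A's scan over the fixed priority list (with an inner membership test per
-- priority) by a single pass over the input goals keeping the minimum-rank recognised goal.


-- ===== PORT A =====
def mappingA : PySem.Dict String String :=
  PySem.Dict.ofList [("lose_fat", "fatloss"), ("build_muscle", "strength"),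
                     ("improve_health", "mobility"), ("increase_energy", "mobility")]

-- the 'for item in priority' loop; 'mapping[item]' never misses (every priority key is in
-- mapping), so get? returning some is exact here
def loopA (goals : List String) : List String → Option String
  | [] => none
  | item :: rest =>
      if goals.contains item then PySem.Dict.get? mappingA item
      else loopA goals rest

def primary_goal (goals : List String) : Option String :=
  loopA goals ["lose_fat", "build_muscle", "improve_health", "increase_energy"]

-- ===== PORT B =====
def rankB : PySem.Dict String (Int × String) :=
  PySem.Dict.ofList [("lose_fat", (0, "fatloss")), ("build_muscle", (1, "strength")),
                     ("improve_health", (2, "mobility")), ("increase_energy", (3, "mobility"))]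

-- body of B's 'for g in goals' loop
def stepB (best : Option (Int × String)) (g : String) : Option (Int × String) :=
  match PySem.Dict.get? rankB g with
  | none => best
  | some r =>
      match best with
      | none => some r
      | some b => if r.1 < b.1 then some r else best

def primary_goal_alt (goals : List String) : Option String :=
  match goals.foldl stepB none with
  | none => none
  | some b => some b.2

-- ===== PRECONDITION & SPEC =====
def Spec_primary_goal (goals : List String) (out : Option String) : Prop := out = primary_goal_alt goals
instance (goals : List String) (out : Option String) : Decidable (Spec_primary_goal goals out) := by unfold Spec_primary_goal; infer_instance

-- ===== CLAIM (what is proved, stated in full; the proofs are below) =====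
def Claim_equal_primary_goal : Prop := ∀ (goals : List String), Dom_primary_goal goals → Spec_primary_goal goals (primary_goal goals)

-- ===== LEMMAS AND PROOFS =====

-- min with left bias, the combining operation underlying B's fold
def mergeP (a b : Option (Int × String)) : Option (Int × String) :=
  match a, b with
  | none, b => b
  | some x, none => some x
  | some x, some y => if y.1 < x.1 then some y else some x

-- the best (minimum-rank) recognised goal of a list, phrased by priority order
def specBest (gs : List String) : Option (Int × String) :=
  if gs.contains "lose_fat" then some (0, "fatloss")
  else if gs.contains "build_muscle" then some (1, "strength")
  else if gs.contains "improve_health" then some (2, "mobility")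
  else if gs.contains "increase_energy" then some (3, "mobility")
  else none

theorem stepB_eq_merge (acc : Option (Int × String)) (g : String) :
    stepB acc g = mergeP acc (PySem.Dict.get? rankB g) := by
  cases h : PySem.Dict.get? rankB g <;> cases acc <;> simp [stepB, mergeP, h]

theorem mergeP_none_right (a : Option (Int × String)) : mergeP a none = a := by
  cases a <;> rfl

theorem mergeP_assoc (a b c : Option (Int × String)) :
    mergeP (mergeP a b) c = mergeP a (mergeP b c) := by
  rcases a with _ | x
  · rfl
  rcases b with _ | y
  · rfl
  rcases c with _ | z
  · show mergeP (mergeP (some x) (some y)) none = _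
    rw [mergeP_none_right, mergeP_none_right]
  · show mergeP (mergeP (some x) (some y)) (some z) = mergeP (some x) (mergeP (some y) (some z))
    by_cases h1 : y.1 < x.1 <;> by_cases h2 : z.1 < y.1 <;> by_cases h3 : z.1 < x.1 <;>
      simp [mergeP, h1, h2, h3] <;> first | rfl | omega

theorem rankB_mk : rankB = PySem.Dict.mk
    [("lose_fat", (0, "fatloss")), ("build_muscle", (1, "strength")),
     ("improve_health", (2, "mobility")), ("increase_energy", (3, "mobility"))] := by decide

theorem get?_rankB_none (g : String) (h1 : g ≠ "lose_fat") (h2 : g ≠ "build_muscle")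
    (h3 : g ≠ "improve_health") (h4 : g ≠ "increase_energy") :
    PySem.Dict.get? rankB g = none := by
  rw [rankB_mk]
  simp [PySem.Dict.get?, Ne.symm h1, Ne.symm h2, Ne.symm h3, Ne.symm h4]

theorem specBest_cons (g : String) (gs : List String) :
    specBest (g :: gs) = mergeP (PySem.Dict.get? rankB g) (specBest gs) := by
  by_cases h1 : g = "lose_fat"
  · subst h1
    simp only [specBest, List.contains_cons]
    simp only [show PySem.Dict.get? rankB "lose_fat" = some (0, "fatloss") from rfl]
    split_ifs <;> simp_all [mergeP]
  by_cases h2 : g = "build_muscle"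
  · subst h2
    simp only [specBest, List.contains_cons]
    simp only [show PySem.Dict.get? rankB "build_muscle" = some (1, "strength") from rfl]
    split_ifs <;> simp_all [mergeP]
  by_cases h3 : g = "improve_health"
  · subst h3
    simp only [specBest, List.contains_cons]
    simp only [show PySem.Dict.get? rankB "improve_health" = some (2, "mobility") from rfl]
    split_ifs <;> simp_all [mergeP]
  by_cases h4 : g = "increase_energy"
  · subst h4
    simp only [specBest, List.contains_cons]
    simp only [show PySem.Dict.get? rankB "increase_energy" = some (3, "mobility") from rfl]
    split_ifs <;> simp_all [mergeP]
  · rw [get?_rankB_none g h1 h2 h3 h4]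
    simp only [specBest, List.contains_cons, mergeP]
    have e1 : ("lose_fat" == g) = false := by simpa using fun h => h1 h.symm
    have e2 : ("build_muscle" == g) = false := by simpa using fun h => h2 h.symm
    have e3 : ("improve_health" == g) = false := by simpa using fun h => h3 h.symm
    have e4 : ("increase_energy" == g) = false := by simpa using fun h => h4 h.symm
    simp [e1, e2, e3, e4]

theorem foldl_stepB (gs : List String) : ∀ acc : Option (Int × String),
    gs.foldl stepB acc = mergeP acc (specBest gs) := by
  induction gs with
  | nil => intro acc; simp [specBest, mergeP_none_right]
  | cons g gs ih =>
      intro acc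
      rw [List.foldl_cons, ih, stepB_eq_merge, mergeP_assoc, ← specBest_cons]

theorem alt_eq_specBest (gs : List String) :
    primary_goal_alt gs = (specBest gs).map (·.2) := by
  simp only [primary_goal_alt, foldl_stepB, mergeP]
  cases specBest gs <;> rfl

theorem primary_goal_spec : Claim_equal_primary_goal := by
  intro goals _
  show primary_goal goals = primary_goal_alt goals
  rw [alt_eq_specBest]
  simp only [primary_goal, loopA, specBest]
  split_ifs <;> rfl

-- ===== VERDICT (by name: the statement is the Claim_ definition above) =====
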